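-- pv_equiv track=rewrite | github.com/Jagoslav/AES-Cipher | main.py | split_into_blocks
-- ===== SOURCE A (Python) =====
-- block_size = 16
--
-- def split_into_blocks(string):
--     temp_list = []
--     while len(string) > block_size:
--         sub_str, string = string[0:block_size], string[block_size:]
--         temp_list.append(sub_str)
--     while len(string) < block_size:
--         string += '#'
--     temp_list.append(string)
--     return temp_list
-- ===== SOURCE B (Python) =====
-- def split_into_blocks(string):
--     n = len(string)
--     pad = 16 if n == 0 else (16 - n % 16) % 16
--     padded = string + '#' * pad
--     return [padded[i:i + 16] for i in range(0, len(padded), 16)]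
-- ===== Notes on version B (the rewrite author's own statement) =====
-- stated objective: faster
-- what changed: Replaces A's two interleaved while-loops (repeatedly slicing the remaining string, which re-copies the tail each iteration, then growing the last block one '#' at a time) with a closed-form padding amount, one padding concatenation, and a single uniform slice-chunking pass over the padded string.
import Mathlib
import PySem

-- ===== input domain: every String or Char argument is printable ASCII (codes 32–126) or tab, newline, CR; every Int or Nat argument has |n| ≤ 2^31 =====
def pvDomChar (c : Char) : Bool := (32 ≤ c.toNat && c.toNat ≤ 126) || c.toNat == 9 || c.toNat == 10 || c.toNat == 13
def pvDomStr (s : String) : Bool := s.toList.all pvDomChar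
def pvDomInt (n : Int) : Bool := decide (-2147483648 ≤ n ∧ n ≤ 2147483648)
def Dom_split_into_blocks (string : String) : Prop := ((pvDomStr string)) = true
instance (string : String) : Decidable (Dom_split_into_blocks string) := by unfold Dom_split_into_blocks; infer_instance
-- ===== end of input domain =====

-- B replaces A's interleaved extract-then-pad-one-'#'-at-a-time loops by computing the total
-- padding with one closed formula, padding once, and chunking the padded string uniformly (objective: faster, measured).

-- ===== PORT A =====
-- while len(string) > 16: pop string[0:16]; then while len(string) < 16: string += '#'
def pvPadA (l : List Char) : List Char :=
  if l.length < 16 then pvPadA (l ++ ['#']) else l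
termination_by 16 - l.length
decreasing_by simp; omega

def pvSplitA (l : List Char) (acc : List (List Char)) : List (List Char) :=
  if 16 < l.length then
    pvSplitA (PySem.List.slice l (some 16) none) (acc ++ [PySem.List.slice l (some 0) (some 16)])
  else
    acc ++ [pvPadA l]
termination_by l.length
decreasing_by
  rw [PySem.List.slice_from l (by norm_num)]
  simp
  omega

def split_into_blocks (string : String) : List String :=
  (pvSplitA string.toList []).map (fun b => String.ofList b)

-- ===== PORT B =====
-- pad = 16 if n == 0 else (16 - n % 16) % 16; padded = string + '#'*pad; chunk padded by 16
def split_into_blocks_alt (string : String) : List String :=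
  let n := string.toList.length
  let pad : Nat := if n = 0 then 16 else (16 - n % 16) % 16
  let padded := string.toList ++ List.replicate pad '#'
  (PySem.List.pyRange 0 (padded.length : Int) 16).map
    (fun i => String.ofList (PySem.List.slice padded (some i) (some (i + 16))))

-- ===== PRECONDITION & SPEC =====
def Spec_split_into_blocks (string : String) (out : List String) : Prop := out = split_into_blocks_alt string
instance (string : String) (out : List String) : Decidable (Spec_split_into_blocks string out) := by unfold Spec_split_into_blocks; infer_instance

-- ===== CLAIM (what is proved, stated in full; the proofs are below) =====
def Claim_equal_split_into_blocks : Prop := ∀ (string : String), Dom_split_into_blocks string → Spec_split_into_blocks string (split_into_blocks string)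

-- ===== LEMMAS AND PROOFS =====

-- total padding B adds to a string of length n, and the number of 16-char blocks produced
def pvPadN (n : Nat) : Nat := if n = 0 then 16 else (16 - n % 16) % 16
def pvBlkN (n : Nat) : Nat := (n + pvPadN n) / 16

-- the blocks [l[16k : 16k+16] for k < m]
def pvChunks (l : List Char) (m : Nat) : List (List Char) :=
  (List.range m).map (fun k => (l.drop (16 * k)).take 16)

lemma pvPadN_of_le (n : Nat) (h : n ≤ 16) : pvPadN n = 16 - n := by
  unfold pvPadN; split_ifs with h0 <;> omega

lemma pvLen_pad (n : Nat) : n + pvPadN n = 16 * pvBlkN n := by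
  unfold pvBlkN pvPadN; split_ifs with h0 <;> omega

lemma pvChunks_succ (l : List Char) (m : Nat) :
    pvChunks l (m + 1) = l.take 16 :: pvChunks (l.drop 16) m := by
  unfold pvChunks
  rw [List.range_succ_eq_map, List.map_cons, List.map_map]
  refine congrArg₂ _ (by simp) (List.map_congr_left ?_)
  intro k _
  simp [Nat.succ_eq_add_one, List.drop_drop, Nat.mul_add, Nat.add_comm]

lemma pvPadA_eq : ∀ (k : Nat) (l : List Char), 16 - l.length ≤ k →
    pvPadA l = l ++ List.replicate (16 - l.length) '#' := by
  intro k
  induction k with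
  | zero =>
    intro l h
    rw [pvPadA]
    have hlen : ¬ l.length < 16 := by omega
    simp [hlen]
    omega
  | succ k ih =>
    intro l h
    rw [pvPadA]
    by_cases hlen : l.length < 16
    · rw [if_pos hlen, ih (l ++ ['#']) (by simp; omega)]
      obtain ⟨m, hm⟩ : ∃ m, 16 - l.length = m + 1 := ⟨16 - l.length - 1, by omega⟩
      simp [hm]
      simp [List.replicate_succ]
      omega
    · rw [if_neg hlen]
      have : 16 - l.length = 0 := by omega
      simp [this]

lemma pvSplitA_eq : ∀ (k : Nat) (l : List Char), l.length ≤ k → ∀ (acc : List (List Char)),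
    pvSplitA l acc = acc ++ pvChunks (l ++ List.replicate (pvPadN l.length) '#') (pvBlkN l.length) := by
  intro k
  induction k with
  | zero =>
    intro l h acc
    have hnil : l = [] := by cases l <;> simp_all
    subst hnil
    rw [pvSplitA]
    simp only [List.length_nil, if_neg (by norm_num : ¬ (16 < 0))]
    rw [pvPadA_eq 16 [] (by simp)]
    have hb : pvBlkN 0 = 1 := by unfold pvBlkN pvPadN; norm_num
    have hp : pvPadN 0 = 16 := by unfold pvPadN; norm_num
    simp [hb, hp, pvChunks]
  | succ k ih =>
    intro l h acc
    rw [pvSplitA]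
    by_cases hlen : 16 < l.length
    · rw [if_pos hlen]
      rw [PySem.List.slice_from l (by norm_num)]
      have h0 : PySem.List.slice l (some 0) (some 16) = l.take 16 := by
        have := PySem.List.slice_natCast_add l 0 16
        simpa using this
      rw [h0]
      have hdlen : (l.drop (16:Int).toNat).length ≤ k := by simp; omega
      rw [ih _ hdlen]
      have htoNat : ((16:Int).toNat) = 16 := rfl
      rw [htoNat]
      have hdroplen : (l.drop 16).length = l.length - 16 := by simp
      rw [hdroplen]
      -- pad of the tail equals pad of the whole, block count drops by one
      have hpad : pvPadN (l.length - 16) = pvPadN l.length := by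
        unfold pvPadN; split_ifs with h1 h2 h2 <;> omega
      have hple : pvPadN l.length ≤ 16 := by unfold pvPadN; split_ifs <;> omega
      have hblk : pvBlkN l.length = pvBlkN (l.length - 16) + 1 := by
        unfold pvBlkN
        rw [hpad]
        omega
      rw [hpad, hblk, pvChunks_succ]
      rw [List.take_append_of_le_length (by omega), List.drop_append_of_le_length (by omega)]
      have htake : l.take 16 = List.take 16 l := rfl
      simp [List.append_assoc]
    · rw [if_neg hlen]
      rw [pvPadA_eq 16 l (by omega)]
      have hp : pvPadN l.length = 16 - l.length := pvPadN_of_le _ (by omega)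
      have hb : pvBlkN l.length = 1 := by
        unfold pvBlkN
        rw [hp]
        omega
      rw [hp, hb]
      unfold pvChunks
      simp only [List.range_one, List.map_cons, List.map_nil, Nat.mul_zero, List.drop_zero]
      rw [List.take_of_length_le (by simp; omega)]

lemma pvRange16 (l : List Char) (m : Nat) :
    (PySem.List.pyRange 0 ((16 * m : Nat) : Int) 16).map
      (fun i => PySem.List.slice l (some i) (some (i + 16))) = pvChunks l m := by
  rw [PySem.List.pyRange_of_pos _ _ (by norm_num)]
  have hcount : (if (0:Int) < ((16 * m : Nat) : Int)
      then ((((16 * m : Nat) : Int) - 0 + 16 - 1) / 16).toNat else 0) = m := by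
    split_ifs with h <;> omega
  rw [hcount, List.map_map]
  unfold pvChunks
  refine List.map_congr_left ?_
  intro k _
  show PySem.List.slice l (some (0 + 16 * (k:Int))) (some (0 + 16 * (k:Int) + 16)) = _
  have h1 : (0 + 16 * (k:Int)) = ((16 * k : Nat) : Int) := by push_cast; ring
  rw [h1]
  have := PySem.List.slice_natCast_add l (16 * k) 16
  simpa using this

-- ===== VERDICT (by name: the statement is the Claim_ definition above) =====
theorem split_into_blocks_spec : Claim_equal_split_into_blocks := by
  intro s _
  unfold Spec_split_into_blocks split_into_blocks split_into_blocks_alt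
  rw [pvSplitA_eq s.toList.length s.toList (le_refl _) []]
  set n := s.toList.length with hn
  have hpadlen : (s.toList ++ List.replicate (pvPadN n) '#').length = 16 * pvBlkN n := by
    simp [← hn, pvLen_pad]
  show _ = (PySem.List.pyRange 0 (((s.toList ++ List.replicate (if n = 0 then 16 else (16 - n % 16) % 16) '#').length : Nat) : Int) 16).map _
  have hpn : (if n = 0 then 16 else (16 - n % 16) % 16) = pvPadN n := rfl
  rw [hpn, hpadlen]
  have hcomp : (fun i => String.ofList (PySem.List.slice (s.toList ++ List.replicate (pvPadN n) '#') (some i) (some (i + 16))))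
      = (fun b => String.ofList b) ∘ (fun i => PySem.List.slice (s.toList ++ List.replicate (pvPadN n) '#') (some i) (some (i + 16))) := rfl
  rw [hcomp, ← List.map_map, pvRange16]
  simp
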